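-- pv_equiv track=rewrite | github.com/DNYoussef/AIVillage | agents/magi/techniques/choice_annealing.py | _parse_solutions
-- ===== SOURCE A (Python) =====
-- from typing import Dict, Any, List, Optional, Tuple
--
-- def _parse_solutions(response: str) -> List[str]:
--     """Parse solutions from response."""
--     solutions = []
--     current_solution = []
--     in_solution = False
--
--     for line in response.split('\n'):
--         line = line.strip()
--         if not line:
--             continue
--
--         if line.startswith('Solution ') or line.startswith('Alternative '):
--             if current_solution:
--                 solutions.append('\n'.join(current_solution))
--                 current_solution = []
--             in_solution = True
--         elif line.startswith('Reasoning:') or line.startswith('Improvements:'):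
--             in_solution = False
--         elif in_solution:
--             current_solution.append(line)
--
--     if current_solution:
--         solutions.append('\n'.join(current_solution))
--
--     return solutions
-- ===== SOURCE B (Python) =====
-- def _is_header(line):
--     return line.startswith('Solution ') or line.startswith('Alternative ')
--
--
-- def _is_stop(line):
--     return line.startswith('Reasoning:') or line.startswith('Improvements:')
--
--
-- def _parse_solutions(response):
--     """Parse solutions from response."""
--     lines = [s for s in (raw.strip() for raw in response.split('\n')) if s]
--     n = len(lines)
--     solutions = []
--     i = 0
--     while i < n:
--         if not _is_header(lines[i]):
--             i += 1
--             continue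
--         # find the end of this header's group (next header or end of input)
--         j = i + 1
--         while j < n and not _is_header(lines[j]):
--             j += 1
--         # body: group lines up to (excluding) the first Reasoning:/Improvements: line
--         body = []
--         for line in lines[i + 1:j]:
--             if _is_stop(line):
--                 break
--             body.append(line)
--         if body:
--             solutions.append('\n'.join(body))
--         i = j
--     return solutions
-- ===== Notes on version B (the rewrite author's own statement) =====
-- stated objective: alternative
-- what changed: Replaces A's single stateful pass (in_solution flag, flush-on-header accumulator) by a grouping pass: clean the lines once, then for each header slice out its group up to the next header and truncate it at the first Reasoning:/Improvements: line.
import Mathlib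
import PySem

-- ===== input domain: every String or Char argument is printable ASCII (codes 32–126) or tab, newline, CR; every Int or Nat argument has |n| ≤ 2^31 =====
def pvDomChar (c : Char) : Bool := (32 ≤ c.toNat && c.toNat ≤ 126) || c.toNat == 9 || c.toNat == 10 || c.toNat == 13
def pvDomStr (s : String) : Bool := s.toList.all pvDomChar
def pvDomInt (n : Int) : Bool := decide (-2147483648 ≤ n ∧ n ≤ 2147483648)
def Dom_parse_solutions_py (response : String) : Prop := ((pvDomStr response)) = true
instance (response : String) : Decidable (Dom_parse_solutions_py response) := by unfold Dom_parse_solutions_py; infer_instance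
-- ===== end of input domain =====

-- B replaces A's single pass with a flag by a header-indexed grouping pass (collect each
-- header's group, truncate it at the first Reasoning:/Improvements: line); objective: alternative.

-- shared helpers (same operations both Pythons perform)
-- response.split('\n') — sep is the non-empty literal '\n', so Chars.splitOn is the exact form
def splitNL (s : String) : List String := (PySem.Chars.splitOn s.toList ['\n']).map String.ofList

def isHeaderL (l : String) : Bool :=
  PySem.Str.startswith l "Solution " || PySem.Str.startswith l "Alternative "

def isStopL (l : String) : Bool :=
  PySem.Str.startswith l "Reasoning:" || PySem.Str.startswith l "Improvements:"

-- 'if current_solution: solutions.append("\n".join(current_solution))'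
def emitJ (c : List String) : List String :=
  if c = [] then [] else [PySem.Str.join "\n" c]

-- ===== PORT A =====
-- state = (solutions, current_solution, in_solution)
def aStep (st : List String × List String × Bool) (raw : String) :
    List String × List String × Bool :=
  let line := PySem.Str.strip raw
  if line = "" then st
  else if isHeaderL line then (st.1 ++ emitJ st.2.1, [], true)
  else if isStopL line then (st.1, st.2.1, false)
  else if st.2.2 then (st.1, st.2.1 ++ [line], true)
  else st

def parse_solutions_py (response : String) : List String :=
  let fin := (splitNL response).foldl aStep ([], [], false)
  fin.1 ++ emitJ fin.2.1

-- ===== PORT B =====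
-- recursion over the cleaned lines: skip to a header, slice out its group
-- (up to the next header), truncate the group at the first stop line, emit if non-empty
def altGo : List String → List String
  | [] => []
  | l :: ls =>
    if isHeaderL l then
      emitJ ((ls.takeWhile (fun x => !isHeaderL x)).takeWhile (fun x => !isStopL x))
        ++ altGo (ls.dropWhile (fun x => !isHeaderL x))
    else altGo ls
termination_by L => L.length
decreasing_by
  · simpa using Nat.lt_succ_of_le (List.length_dropWhile_le _ _)
  · simp

def parse_solutions_py_alt (response : String) : List String :=
  altGo (((splitNL response).map PySem.Str.strip).filter (fun s => s != ""))

-- ===== PRECONDITION & SPEC =====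
def Spec_parse_solutions_py (response : String) (out : List String) : Prop := out = parse_solutions_py_alt response
instance (response : String) (out : List String) : Decidable (Spec_parse_solutions_py response out) := by unfold Spec_parse_solutions_py; infer_instance

-- ===== CLAIM (what is proved, stated in full; the proofs are below) =====
def Claim_equal_parse_solutions_py : Prop := ∀ (response : String), Dom_parse_solutions_py response → Spec_parse_solutions_py response (parse_solutions_py response)

-- ===== LEMMAS AND PROOFS =====

-- reference recursion capturing A's loop on the cleaned lines
def run (c : List String) (b : Bool) : List String → List String
  | [] => emitJ c
  | l :: L =>
    if isHeaderL l then emitJ c ++ run [] true L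
    else if isStopL l then run c false L
    else if b then run (c ++ [l]) b L
    else run c b L

theorem foldl_aStep_eq_run (raws : List String) (s c : List String) (b : Bool) :
    (let fin := raws.foldl aStep (s, c, b); fin.1 ++ emitJ fin.2.1)
      = s ++ run c b ((raws.map PySem.Str.strip).filter (fun x => x != "")) := by
  induction raws generalizing s c b with
  | nil => simp [run]
  | cons raw rest ih =>
    simp only [List.foldl_cons, List.map_cons, List.filter_cons]
    by_cases h0 : PySem.Str.strip raw = ""
    · simp [aStep, h0, ih]
    · by_cases h1 : isHeaderL (PySem.Str.strip raw)
      · simp [aStep, h0, h1, run, ih, List.append_assoc]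
      · by_cases h2 : isStopL (PySem.Str.strip raw)
        · simp [aStep, h0, h1, h2, run, ih]
        · cases b <;> simp [aStep, h0, h1, h2, run, ih]

theorem altGo_dropWhile (L : List String) :
    altGo (L.dropWhile (fun x => !isHeaderL x)) = altGo L := by
  induction L with
  | nil => rfl
  | cons l ls ih =>
    by_cases h : isHeaderL l
    · simp [h]
    · rw [List.dropWhile_cons]
      simp only [h, Bool.not_false, if_true]
      rw [ih, altGo]
      simp [h]

theorem run_eq_altGo (L : List String) :
    (∀ c, run c true L
        = emitJ (c ++ (L.takeWhile (fun x => !isHeaderL x)).takeWhile (fun x => !isStopL x))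
          ++ altGo (L.dropWhile (fun x => !isHeaderL x)))
    ∧ (∀ c, run c false L = emitJ c ++ altGo L) := by
  induction L with
  | nil => simp [run, altGo]
  | cons l ls ih =>
    obtain ⟨ihT, ihF⟩ := ih
    by_cases h1 : isHeaderL l
    · constructor <;> intro c <;>
        simp [run, h1, altGo, ihT []]
    · by_cases h2 : isStopL l
      · constructor <;> intro c
        · simp [run, h1, h2, ihF c, altGo_dropWhile]
        · rw [run]
          simp only [h1, h2, if_true, ihF c]
          rw [altGo]
          simp [h1]
      · constructor <;> intro c
        · rw [run]
          simp only [h1, h2, if_true]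
          rw [ihT (c ++ [l])]
          simp [h1, h2]
        · rw [run]
          simp only [h1, h2, Bool.false_eq_true, ihF c]
          rw [altGo]
          simp [h1]

-- ===== VERDICT (by name: the statement is the Claim_ definition above) =====
theorem parse_solutions_py_spec : Claim_equal_parse_solutions_py := by
  intro response _
  unfold Spec_parse_solutions_py parse_solutions_py parse_solutions_py_alt
  rw [foldl_aStep_eq_run]
  rw [(run_eq_altGo _).2 []]
  simp [emitJ]
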